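-- pv_equiv track=rewrite | github.com/codesquad-backend-study/daily-algorithm-challenge | Sully/baekjoon/B2164.py | solution
-- ===== SOURCE A (Python) =====
-- import collections
--
-- def solution(card_count: int) -> int:
--     queue = collections.deque()
--
--     # 카드 초기화
--     for i in range(1, card_count + 1):
--         queue.append(i)
--
--     # 한 장 남을 때까지 반복
--     while True:
--         if len(queue) == 1:
--             break
--
--         queue.popleft()
--         queue.append(queue.popleft())
--
--     return queue.pop()
-- ===== SOURCE B (Python) =====
-- def solution(card_count: int) -> int:
--     # largest power of two <= card_count
--     L = 1
--     while 2 * L <= card_count: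
--         L *= 2
--     r = card_count - L
--     return card_count if r == 0 else 2 * r
-- ===== Notes on version B (the rewrite author's own statement) =====
-- stated objective: faster
-- what changed: Replaced the O(n) deque simulation of the Josephus card game with the closed form 2*(n - largest_power_of_2_le_n) (n itself when n is a power of two), computed with an O(log n) doubling loop.
import Mathlib
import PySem

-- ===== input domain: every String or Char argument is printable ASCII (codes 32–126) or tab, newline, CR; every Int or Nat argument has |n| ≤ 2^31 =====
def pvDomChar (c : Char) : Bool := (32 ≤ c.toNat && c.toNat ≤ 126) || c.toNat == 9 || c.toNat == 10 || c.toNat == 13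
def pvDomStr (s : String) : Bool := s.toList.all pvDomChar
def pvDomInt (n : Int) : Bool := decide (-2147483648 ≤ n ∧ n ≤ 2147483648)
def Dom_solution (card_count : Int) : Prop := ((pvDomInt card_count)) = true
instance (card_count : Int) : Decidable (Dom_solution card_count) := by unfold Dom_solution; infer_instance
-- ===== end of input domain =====

-- B replaces A's O(n) deque simulation with the O(log n) Josephus closed form 2*(n - largest power of 2 ≤ n).

-- ===== PORT A =====
-- the while-loop on the deque: one step pops the front and moves the next card to the back
def loopA : List Int → Int
  | [] => 0            -- Python raises here (empty deque); excluded by Pre_solution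
  | [x] => x
  | _ :: y :: rest => loopA (rest ++ [y])
termination_by l => l.length
decreasing_by simp [List.length_append]

def solution (card_count : Int) : Int :=
  loopA (PySem.List.pyRange 1 (card_count + 1) 1)

-- ===== PORT B =====
-- while 2*L <= n: L *= 2   (the guard 0 < L only makes the recursion total; Python's L starts at 1 and stays positive)
def powLoop (n L : Int) : Int :=
  if h : 0 < L ∧ 2 * L ≤ n then powLoop n (2 * L) else L
termination_by (n - L).toNat
decreasing_by omega

def solution_alt (card_count : Int) : Int :=
  let L := powLoop card_count 1
  if card_count - L = 0 then card_count else 2 * (card_count - L)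

-- ===== PRECONDITION & SPEC =====
-- A raises IndexError (popleft from an empty deque) for card_count ≤ 0; Pre_ excludes exactly those inputs.
def Pre_solution (card_count : Int) : Prop := 1 ≤ card_count
instance (card_count : Int) : Decidable (Pre_solution card_count) := by unfold Pre_solution; infer_instance
def pvWitness_solution : Int := (6)

def Spec_solution (card_count : Int) (out : Int) : Prop := out = solution_alt card_count
instance (card_count : Int) (out : Int) : Decidable (Spec_solution card_count out) := by unfold Spec_solution; infer_instance

-- ===== CLAIM (what is proved, stated in full; the proofs are below) =====
def Claim_equal_solution : Prop := ∀ (card_count : Int), Dom_solution card_count → Pre_solution card_count → Spec_solution card_count (solution card_count)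

-- ===== LEMMAS AND PROOFS =====

-- [1..m] as a list of Ints
def intRange (m : Nat) : List Int := (List.range m).map (fun i : Nat => (i : Int) + 1)

-- elements at odd positions 1,3,5,…
def oddIdx : List Int → List Int
  | [] => []
  | [_] => []
  | _ :: y :: r => y :: oddIdx r

theorem loopA_single (x : Int) : loopA [x] = x := by simp [loopA]
theorem loopA_step (x y : Int) (r : List Int) : loopA (x :: y :: r) = loopA (r ++ [y]) := by
  rw [loopA]

-- loopA selects an element by position only, so it commutes with map
theorem loopA_map (f : Int → Int) (l : List Int) (hl : l ≠ []) :
    loopA (l.map f) = f (loopA l) := by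
  induction l using loopA.induct with
  | case1 => exact absurd rfl hl
  | case2 x => simp [loopA]
  | case3 x y rest ih =>
    rw [List.map_cons, List.map_cons, loopA_step, loopA_step,
      show [f y] = List.map f [y] from rfl, ← List.map_append]
    exact ih (by simp)

theorem pass_even : ∀ (l p : List Int), l.length % 2 = 0 →
    loopA (l ++ p) = loopA (p ++ oddIdx l) := by
  intro l
  induction l using oddIdx.induct with
  | case1 => intro p _; simp [oddIdx]
  | case2 x => intro p h; simp at h
  | case3 x y r ih =>
    intro p h
    have : r.length % 2 = 0 := by simp at h; omega
    rw [List.cons_append, List.cons_append, loopA_step, List.append_assoc,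
      ih (p ++ [y]) this, List.append_assoc, oddIdx]
    rfl

theorem oddIdx_append : ∀ (l p : List Int), l.length % 2 = 0 →
    oddIdx (l ++ p) = oddIdx l ++ oddIdx p := by
  intro l
  induction l using oddIdx.induct with
  | case1 => intro p _; simp [oddIdx]
  | case2 x => intro p h; simp at h
  | case3 x y r ih =>
    intro p h
    have : r.length % 2 = 0 := by simp at h; omega
    simp only [List.cons_append, oddIdx, ih p this]

theorem length_intRange (m : Nat) : (intRange m).length = m := by simp [intRange]

theorem intRange_succ (m : Nat) : intRange (m + 1) = intRange m ++ [(m : Int) + 1] := by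
  simp [intRange, List.range_succ]

theorem intRange_ne_nil (m : Nat) (hm : 1 ≤ m) : intRange m ≠ [] := by
  intro hc
  have := length_intRange m
  rw [hc] at this
  simp at this
  omega

theorem intRange_cons (m : Nat) :
    intRange (m + 1) = 1 :: (intRange m).map (fun x => x + 1) := by
  rw [intRange, List.range_succ_eq_map, List.map_cons, List.map_map, intRange, List.map_map]
  simp only [List.cons.injEq]
  constructor
  · norm_num
  · apply List.map_congr_left
    intro a _
    simp only [Function.comp_apply]
    push_cast
    ring

theorem mem_intRange {x : Int} {m : Nat} (h : x ∈ intRange m) : 1 ≤ x ∧ x ≤ m := by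
  simp [intRange] at h
  obtain ⟨i, hi, rfl⟩ := h
  omega

theorem oddIdx_intRange (m : Nat) :
    oddIdx (intRange (2 * m)) = (intRange m).map (fun k => 2 * k) := by
  induction m with
  | zero => simp [intRange, oddIdx]
  | succ k ih =>
    have h2 : 2 * (k + 1) = 2 * k + 1 + 1 := by ring
    rw [h2, intRange_succ, intRange_succ, List.append_assoc,
      oddIdx_append _ _ (by simp [length_intRange]), ih, intRange_succ, List.map_append]
    simp [oddIdx]
    ring

-- ===== powLoop facts =====
theorem powLoop_pos (n L : Int) (hL : 0 < L) : 0 < powLoop n L := by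
  rw [powLoop]
  split
  · exact powLoop_pos n (2 * L) (by omega)
  · exact hL
termination_by (n - L).toNat
decreasing_by omega

theorem powLoop_le (n L : Int) (hL : 0 < L) (hn : L ≤ n) : powLoop n L ≤ n := by
  rw [powLoop]
  split
  · next h => exact powLoop_le n (2 * L) (by omega) (by omega)
  · exact hn
termination_by (n - L).toNat
decreasing_by omega

theorem powLoop_gt (n L : Int) (hL : 0 < L) : n < 2 * powLoop n L := by
  rw [powLoop]
  split
  · next h => exact powLoop_gt n (2 * L) (by omega)
  · next h => omega
termination_by (n - L).toNat
decreasing_by omega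

theorem powLoop_double (n L : Int) (hL : 0 < L) :
    powLoop (2 * n) (2 * L) = 2 * powLoop n L := by
  conv_lhs => rw [powLoop]
  conv_rhs => rw [powLoop]
  have hiff : (0 < 2 * L ∧ 2 * (2 * L) ≤ 2 * n) ↔ (0 < L ∧ 2 * L ≤ n) := by omega
  by_cases h : 0 < L ∧ 2 * L ≤ n
  · rw [dif_pos (hiff.mpr h), dif_pos h]
    exact powLoop_double n (2 * L) (by omega)
  · rw [dif_neg (fun hc => h (hiff.mp hc)), dif_neg h]
termination_by (n - L).toNat
decreasing_by omega

theorem powLoop_odd (n L : Int) (hL : 0 < L) :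
    powLoop (2 * n + 1) (2 * L) = powLoop (2 * n) (2 * L) := by
  conv_lhs => rw [powLoop]
  conv_rhs => rw [powLoop]
  have hiff : (0 < 2 * L ∧ 2 * (2 * L) ≤ 2 * n + 1) ↔ (0 < 2 * L ∧ 2 * (2 * L) ≤ 2 * n) := by
    omega
  by_cases h : 0 < 2 * L ∧ 2 * (2 * L) ≤ 2 * n + 1
  · rw [dif_pos h, dif_pos (hiff.mp h)]
    have := powLoop_odd n (2 * L) (by omega)
    simpa [mul_assoc] using this
  · rw [dif_neg h, dif_neg (fun hc => h (hiff.mpr hc))]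
termination_by (n - L).toNat
decreasing_by omega

theorem powLoop_start (n : Int) (hn : 2 ≤ n) : powLoop n 1 = powLoop n 2 := by
  conv_lhs => rw [powLoop]
  rw [dif_pos ⟨one_pos, by omega⟩]
  norm_num

-- ===== closed-form recurrences =====
theorem alt_even (n : Int) (hn : 1 ≤ n) : solution_alt (2 * n) = 2 * solution_alt n := by
  have hd : powLoop (2 * n) 1 = 2 * powLoop n 1 := by
    rw [powLoop_start _ (by omega)]
    have := powLoop_double n 1 (by norm_num)
    simpa using this
  have h1 : 0 < powLoop n 1 := powLoop_pos n 1 (by norm_num)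
  have h2 : powLoop n 1 ≤ n := powLoop_le n 1 (by norm_num) hn
  simp only [solution_alt, hd]
  split_ifs <;> omega

theorem alt_eq_self_iff (n : Int) (hn : 1 ≤ n) :
    solution_alt n = n ↔ n - powLoop n 1 = 0 := by
  have h2 : powLoop n 1 ≤ n := powLoop_le n 1 (by norm_num) hn
  have h3 : n < 2 * powLoop n 1 := powLoop_gt n 1 (by norm_num)
  simp only [solution_alt]
  split_ifs <;> omega

theorem alt_odd (n : Int) (hn : 1 ≤ n) :
    solution_alt (2 * n + 1) = 2 * (if solution_alt n = n then 1 else solution_alt n + 1) := by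
  have hd : powLoop (2 * n + 1) 1 = 2 * powLoop n 1 := by
    rw [powLoop_start _ (by omega)]
    have ho := powLoop_odd n 1 (by norm_num)
    norm_num at ho
    rw [ho]
    have := powLoop_double n 1 (by norm_num)
    simpa using this
  have h1 : 0 < powLoop n 1 := powLoop_pos n 1 (by norm_num)
  have h2 : powLoop n 1 ≤ n := powLoop_le n 1 (by norm_num) hn
  have h3 : n < 2 * powLoop n 1 := powLoop_gt n 1 (by norm_num)
  simp only [alt_eq_self_iff n hn]
  simp only [solution_alt, hd]
  split_ifs <;> omega

theorem alt_one : solution_alt 1 = 1 := by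
  have : powLoop 1 1 = 1 := by
    rw [powLoop]
    rw [dif_neg (by omega)]
  simp [solution_alt, this]

-- ===== the main induction =====
theorem main_eq : ∀ m : Nat, 1 ≤ m → loopA (intRange m) = solution_alt (m : Int) := by
  intro m
  induction m using Nat.strong_induction_on with
  | _ m ih =>
    intro hm
    rcases Nat.lt_or_ge m 2 with h2 | h2
    · -- m = 1
      have hm1 : m = 1 := by omega
      subst hm1
      have h1 : intRange 1 = [1] := by
        rw [intRange, List.range_one, List.map_cons, List.map_nil]
        norm_num
      rw [h1, loopA_single, Nat.cast_one, alt_one]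
    rcases Nat.even_or_odd m with ⟨k, hk⟩ | ⟨k, hk⟩
    · -- even, m = 2k, k ≥ 1
      have hk' : m = 2 * k := by omega
      have hk1 : 1 ≤ k := by omega
      have hkm : k < m := by omega
      have hcast : (m : Int) = 2 * (k : Int) := by omega
      rw [hk', show intRange (2 * k) = intRange (2 * k) ++ [] by simp,
        pass_even _ _ (by simp [length_intRange]), List.nil_append, oddIdx_intRange,
        loopA_map _ _ (intRange_ne_nil k hk1), ih k hkm hk1]
      have hc2 : ((2 * k : Nat) : Int) = 2 * (k : Int) := by push_cast; ring
      rw [hc2, alt_even _ (by omega)]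
    · -- odd, m = 2k+1, k ≥ 1
      have hk1 : 1 ≤ k := by omega
      have hkm : k < m := by omega
      have hcast : (m : Int) = 2 * (k : Int) + 1 := by omega
      obtain ⟨j, rfl⟩ : ∃ j, k = j + 1 := ⟨k - 1, by omega⟩
      subst hk
      set g : Int → Int := fun x => if x = (j : Int) + 1 then 1 else x + 1 with hg
      have e1 : loopA (intRange (2 * (j + 1) + 1)) =
          loopA ((((2 * (j + 1) : Nat) : Int) + 1) ::
            (intRange (j + 1)).map (fun x => 2 * x)) := by
        rw [show 2 * (j + 1) + 1 = (2 * (j + 1)) + 1 from rfl, intRange_succ,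
          pass_even _ _ (by simp [length_intRange]), oddIdx_intRange, List.singleton_append]
      have e2 : (intRange (j + 1)).map (fun x : Int => 2 * x) =
          2 :: ((intRange j).map (fun x => x + 1)).map (fun x => 2 * x) := by
        rw [intRange_cons, List.map_cons]
        norm_num
      have e4 : ((intRange j).map (fun x : Int => x + 1)).map (fun x => 2 * x) ++ [2] =
          ((intRange j).map (fun x : Int => x + 1) ++ [1]).map (fun x : Int => 2 * x) := by
        rw [List.map_append]
        norm_num
      have hmaps : (intRange j).map (fun x : Int => x + 1) ++ [1] =
          (intRange (j + 1)).map g := by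
        rw [intRange_succ, List.map_append]
        congr 1
        · refine (List.map_congr_left ?_).symm
          intro a ha
          have hb := mem_intRange ha
          have hne : a ≠ (j : Int) + 1 := by omega
          simp [hg, hne]
        · simp [hg]
      have hne1 : (intRange (j + 1)).map g ≠ [] := by
        intro hc
        exact intRange_ne_nil (j + 1) (by omega) (List.map_eq_nil_iff.mp hc)
      rw [e1, e2, loopA_step, e4, hmaps,
        loopA_map _ _ hne1, loopA_map _ _ (intRange_ne_nil (j + 1) (by omega)),
        ih (j + 1) hkm hk1, hcast]
      rw [alt_odd _ (by omega)]
      have hjk : ((j : Int) + 1) = ((j + 1 : Nat) : Int) := by push_cast; ring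
      simp only [hg, hjk]

-- ===== VERDICT (by name: the statement is the Claim_ definition above) =====
theorem solution_spec : Claim_equal_solution := by
  intro n _ hpre
  have hn : (1 : Int) ≤ n := hpre
  unfold Spec_solution solution
  rw [PySem.List.pyRange_one]
  have h1 : (n + 1 - 1).toNat = n.toNat := by omega
  have h2 : (List.range n.toNat).map (fun k : Nat => (1 : Int) + k) = intRange n.toNat := by
    rw [intRange]
    apply List.map_congr_left
    intro a _
    ring
  rw [h1, h2, main_eq n.toNat (by omega)]
  have h3 : ((n.toNat : Nat) : Int) = n := by omega
  rw [h3]
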